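-- pv_equiv track=rewrite | github.com/James-HoneyBadger/Time_Warp_II | win2k/templecode27.py | _split_print_args
-- ===== SOURCE A (Python) =====
-- def _split_print_args(text):
--     """Split PRINT arguments on ; and , respecting parens and quotes."""
--     parts = []
--     current = []
--     depth = 0
--     in_string = False
--     for ch in text:
--         if ch == '"':
--             in_string = not in_string
--             current.append(ch)
--         elif not in_string:
--             if ch in "([":
--                 depth += 1
--                 current.append(ch)
--             elif ch in ")]":
--                 depth -= 1
--                 current.append(ch)
--             elif ch in ",;" and depth == 0:
--                 parts.append("".join(current))
--                 current = []
--             else: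
--                 current.append(ch)
--         else:
--             current.append(ch)
--     if current:
--         parts.append("".join(current))
--     return parts
-- ===== SOURCE B (Python) =====
-- def _split_print_args(text):
--     """Split PRINT arguments on ; and , respecting parens and quotes."""
--     cuts = []
--     depth = 0
--     in_string = False
--     for i, ch in enumerate(text):
--         if ch == '"':
--             in_string = not in_string
--         elif not in_string:
--             if ch in "([":
--                 depth += 1
--             elif ch in ")]":
--                 depth -= 1
--             elif ch in ",;" and depth == 0:
--                 cuts.append(i)
--     parts = []
--     prev = 0
--     for i in cuts:
--         parts.append(text[prev:i])
--         prev = i + 1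
--     tail = text[prev:]
--     if tail:
--         parts.append(tail)
--     return parts
-- ===== Notes on version B (the rewrite author's own statement) =====
-- stated objective: alternative
-- what changed: B replaces A's incremental character-buffer accumulation with a two-phase algorithm: one scan records only the indices of top-level delimiters, then the parts are rebuilt by slicing the original string between consecutive cut points.
import Mathlib
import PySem

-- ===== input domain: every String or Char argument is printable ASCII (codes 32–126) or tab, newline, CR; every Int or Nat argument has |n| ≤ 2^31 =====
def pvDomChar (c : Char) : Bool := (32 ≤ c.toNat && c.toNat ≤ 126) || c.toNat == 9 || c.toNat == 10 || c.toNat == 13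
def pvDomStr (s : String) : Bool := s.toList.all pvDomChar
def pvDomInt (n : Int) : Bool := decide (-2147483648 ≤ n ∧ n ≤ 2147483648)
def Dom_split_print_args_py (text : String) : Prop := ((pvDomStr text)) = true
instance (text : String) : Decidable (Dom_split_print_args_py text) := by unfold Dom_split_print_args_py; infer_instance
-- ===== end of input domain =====

-- B replaces A's character-buffer accumulation by a two-phase scan (record top-level delimiter
-- indices, then rebuild the parts by slicing the original string); objective: alternative decomposition, same cost.

-- ===== PORT A =====
-- A's loop: state (parts, current buffer, depth, in_string); at the end append current if nonempty.
def splitLoopA : List Char → List String → List Char → Int → Bool → List String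
  | [], parts, cur, _, _ =>
      if cur = [] then parts else parts ++ [String.ofList cur]
  | c :: cs, parts, cur, depth, ins =>
      if c = '"' then splitLoopA cs parts (cur ++ [c]) depth (!ins)
      else if ins = false then
        if c = '(' ∨ c = '[' then splitLoopA cs parts (cur ++ [c]) (depth + 1) ins
        else if c = ')' ∨ c = ']' then splitLoopA cs parts (cur ++ [c]) (depth - 1) ins
        else if (c = ',' ∨ c = ';') ∧ depth = 0 then splitLoopA cs (parts ++ [String.ofList cur]) [] depth ins
        else splitLoopA cs parts (cur ++ [c]) depth ins
      else splitLoopA cs parts (cur ++ [c]) depth ins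

def split_print_args_py (text : String) : List String :=
  splitLoopA text.toList [] [] 0 false

-- ===== PORT B =====
-- Phase 1 of B: indices of the top-level ','/';' delimiters.
def splitCutsB : List Char → Nat → Int → Bool → List Nat
  | [], _, _, _ => []
  | c :: cs, i, depth, ins =>
      if c = '"' then splitCutsB cs (i + 1) depth (!ins)
      else if ins = false then
        if c = '(' ∨ c = '[' then splitCutsB cs (i + 1) (depth + 1) ins
        else if c = ')' ∨ c = ']' then splitCutsB cs (i + 1) (depth - 1) ins
        else if (c = ',' ∨ c = ';') ∧ depth = 0 then i :: splitCutsB cs (i + 1) depth ins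
        else splitCutsB cs (i + 1) depth ins
      else splitCutsB cs (i + 1) depth ins

-- Phase 2 of B: rebuild the parts by slicing text[prev:i] for each cut, then the nonempty tail.
def splitRebuildB (full : List Char) : Nat → List Nat → List String
  | prev, [] =>
      if full.drop prev = [] then [] else [String.ofList (full.drop prev)]
  | prev, i :: is =>
      String.ofList ((full.drop prev).take (i - prev)) :: splitRebuildB full (i + 1) is

def split_print_args_py_alt (text : String) : List String :=
  splitRebuildB text.toList 0 (splitCutsB text.toList 0 0 false)

-- ===== PRECONDITION & SPEC =====
def Spec_split_print_args_py (text : String) (out : List String) : Prop := out = split_print_args_py_alt text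
instance (text : String) (out : List String) : Decidable (Spec_split_print_args_py text out) := by unfold Spec_split_print_args_py; infer_instance

-- ===== CLAIM (what is proved, stated in full; the proofs are below) =====
def Claim_equal_split_print_args_py : Prop := ∀ (text : String), Dom_split_print_args_py text → Spec_split_print_args_py text (split_print_args_py text)

-- ===== LEMMAS AND PROOFS =====
theorem splitA_eq_B (full : List Char) :
    ∀ (cs : List Char) (prev pos : Nat) (d : Int) (b : Bool) (parts : List String) (cur : List Char),
      prev ≤ pos →
      cur = (full.drop prev).take (pos - prev) →
      full.drop pos = cs →
      splitLoopA cs parts cur d b = parts ++ splitRebuildB full prev (splitCutsB cs pos d b) := by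
  intro cs
  induction cs with
  | nil =>
    intro prev pos d b parts cur hle hcur hdrop
    have hlen : full.length ≤ pos := by
      by_contra h
      have := List.drop_eq_nil_iff.mp hdrop
      omega
    have hcur' : cur = full.drop prev := by
      rw [hcur, List.take_of_length_le]
      simp
      omega
    simp only [splitLoopA, splitCutsB, splitRebuildB, hcur']
    by_cases h : full.drop prev = [] <;> simp [h]
  | cons c cs ih =>
    intro prev pos d b parts cur hle hcur hdrop
    have hpos : pos < full.length := by
      by_contra h
      have : full.drop pos = [] := List.drop_eq_nil_iff.mpr (by omega)
      rw [this] at hdrop; simp at hdrop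
    have hget : full[pos]? = some c := by
      have h0 : (full.drop pos)[0]? = some c := by rw [hdrop]; rfl
      rw [List.getElem?_drop] at h0
      simpa using h0
    have hdrop' : full.drop (pos + 1) = cs := by
      have : full.drop (pos + 1) = (full.drop pos).drop 1 := by
        rw [List.drop_drop]
      rw [this, hdrop]; rfl
    have hcur' : cur ++ [c] = (full.drop prev).take (pos + 1 - prev) := by
      have h1 : pos + 1 - prev = (pos - prev) + 1 := by omega
      rw [h1, List.take_add_one, ← hcur]
      congr 1
      rw [List.getElem?_drop]
      have : prev + (pos - prev) = pos := by omega
      rw [this, hget]; rfl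
    simp only [splitLoopA, splitCutsB]
    by_cases hq : c = '"'
    · subst hq
      simp only [if_true]
      exact ih prev (pos + 1) d (!b) parts (cur ++ ['"']) (by omega) hcur' hdrop'
    · simp only [hq, if_false]
      by_cases hins : b = false
      · subst hins
        simp only [if_true]
        by_cases hop : c = '(' ∨ c = '['
        · simp only [hop, if_true]
          exact ih prev (pos + 1) (d + 1) false parts (cur ++ [c]) (by omega) hcur' hdrop'
        · simp only [hop, if_false]
          by_cases hcl : c = ')' ∨ c = ']'
          · simp only [hcl, if_true]
            exact ih prev (pos + 1) (d - 1) false parts (cur ++ [c]) (by omega) hcur' hdrop'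
          · simp only [hcl, if_false]
            by_cases hdl : (c = ',' ∨ c = ';') ∧ d = 0
            · simp only [if_pos hdl]
              simp only [splitRebuildB]
              rw [← hcur]
              rw [ih (pos + 1) (pos + 1) d false (parts ++ [String.ofList cur]) [] (le_refl _) (by simp) hdrop']
              simp
            · simp only [hdl, if_false]
              exact ih prev (pos + 1) d false parts (cur ++ [c]) (by omega) hcur' hdrop'
      · have hb : b = true := by cases b <;> simp_all
        simp only [hb]
        simp only [show (true = false) = False by simp, if_false]
        exact ih prev (pos + 1) d true parts (cur ++ [c]) (by omega) hcur' (by simpa [hb] using hdrop')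

-- ===== VERDICT (by name: the statement is the Claim_ definition above) =====
theorem split_print_args_py_spec : Claim_equal_split_print_args_py := by
  intro text _
  unfold Spec_split_print_args_py split_print_args_py split_print_args_py_alt
  simpa using splitA_eq_B text.toList text.toList 0 0 0 false [] [] (le_refl 0) (by simp) (by simp)
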